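-- pv_equiv track=rewrite | github.com/63nnn/cpe | CPE/a741.10101_cny/main.py | slice_num
-- ===== SOURCE A (Python) =====
-- def slice_num(x: str):
--     order = [-1, -2, -2, -2]
--     after = []
--     after.append(x[-2:])
--     x = x[:-2]
--     while len(x) > 0:
--         for i in order:
--             if len(x) >= abs(i):
--                 tmp = x[i:]
--                 if int(tmp) == 0:
--                     tmp = ""
--                 after.append(tmp)
--                 x = x[:i]
--     return after[::-1]
-- ===== SOURCE B (Python) =====
-- def slice_num(x: str):
--     # Chunk sizes cycle 1, 2, 2, 2 from the right (after the fixed 2-char tail);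
--     # the last chunk may be shorter.  Slice the original string by positions in
--     # one pass; blank a sliced chunk when its integer value is 0.
--     cut = max(len(x) - 2, 0)
--     groups = [x[cut:]]
--     pattern = [1, 2, 2, 2]
--     pos = cut
--     i = 0
--     while pos > 0:
--         s = min(pattern[i], pos)
--         i = (i + 1) % 4
--         g = x[pos - s:pos]
--         groups.append("" if int(g) == 0 else g)
--         pos -= s
--     return groups[::-1]
-- ===== Notes on version B (the rewrite author's own statement) =====
-- stated objective: simpler
-- what changed: Replaces A's skip-and-retry nested while/for loop that repeatedly truncates the string with a single pass over the original string driven by a cyclic size index (min of the pattern entry and the remaining length), slicing chunks by position; Pre_ excludes exactly the inputs where some chunk makes int() raise ValueError (A and B both raise there).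
import Mathlib
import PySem

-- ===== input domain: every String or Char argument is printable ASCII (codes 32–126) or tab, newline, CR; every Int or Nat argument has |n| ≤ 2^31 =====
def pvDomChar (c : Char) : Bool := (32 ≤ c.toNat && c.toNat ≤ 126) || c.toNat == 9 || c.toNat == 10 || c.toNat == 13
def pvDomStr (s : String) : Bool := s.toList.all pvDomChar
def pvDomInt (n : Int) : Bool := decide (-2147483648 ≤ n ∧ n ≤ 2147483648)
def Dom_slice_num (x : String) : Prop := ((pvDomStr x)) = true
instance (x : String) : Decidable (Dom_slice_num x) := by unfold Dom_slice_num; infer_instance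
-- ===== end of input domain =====

-- B replaces A's skip-and-retry nested while/for loop (which repeatedly truncates the string)
-- by one pass over the original string with a cyclic size index (objective: simpler).

-- ===== PORT A =====
-- body of A's `for i in order` loop; state = (x, after)
def pvStepA (st : List Char × List String) (i : Int) : List Char × List String :=
  if |i| ≤ ((st.1.length : Int)) then
    let tmp := PySem.List.slice st.1 (some i) none
    let tmp' := if PySem.Int.ofChars? tmp = some 0 then ([] : List Char) else tmp
    (PySem.List.slice st.1 none (some i), st.2 ++ [String.ofList tmp'])
  else st

-- termination of A's while loop: each pass shortens x (the i = -1 step always fires)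
lemma pvStepA_len_le (st : List Char × List String) (i : Int) :
    (pvStepA st i).1.length ≤ st.1.length := by
  unfold pvStepA
  split
  · rw [← PySem.List.slice_zero_start, PySem.List.length_slice]
    have h1 := PySem.List.clampIdx_le st.1.length i
    have h0 : PySem.List.clampIdx st.1.length (0:Int) = 0 := by simp [PySem.List.clampIdx]
    omega
  · exact le_refl _

lemma pvLoopA_dec (x : List Char) (after : List String) (h : 0 < x.length) :
    ([(-1 : Int), -2, -2, -2].foldl pvStepA (x, after)).1.length < x.length := by
  simp only [List.foldl_cons, List.foldl_nil]
  have h1 : (pvStepA (x, after) (-1)).1.length < x.length := by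
    have hc : |(-1 : Int)| ≤ (((x, after).1.length : Int)) := by
      have : |(-1 : Int)| = 1 := by decide
      simp only [this]; exact_mod_cast h
    unfold pvStepA
    rw [if_pos hc, PySem.List.slice_to_neg_one]
    simpa using h
  have h2 := pvStepA_len_le (pvStepA (x, after) (-1)) (-2)
  have h3 := pvStepA_len_le (pvStepA (pvStepA (x, after) (-1)) (-2)) (-2)
  have h4 := pvStepA_len_le (pvStepA (pvStepA (pvStepA (x, after) (-1)) (-2)) (-2)) (-2)
  omega

-- A's `while len(x) > 0` loop
def pvLoopA (x : List Char) (after : List String) : List String :=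
  if h : 0 < x.length then
    pvLoopA ([(-1 : Int), -2, -2, -2].foldl pvStepA (x, after)).1
            ([(-1 : Int), -2, -2, -2].foldl pvStepA (x, after)).2
  else after
termination_by x.length
decreasing_by exact pvLoopA_dec x after h

def slice_num (x : String) : List String :=
  (pvLoopA (PySem.List.slice x.toList none (some (-2)))
           [String.ofList (PySem.List.slice x.toList (some (-2)) none)]).reverse

-- ===== PORT B =====
def pvPattern : List Nat := [1, 2, 2, 2]

-- each chunk size is at least 1, so B's loop terminates
lemma pvPattern_getD_pos (i : Nat) : 1 ≤ pvPattern.getD i 1 := by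
  match i with
  | 0 => decide
  | 1 => decide
  | 2 => decide
  | 3 => decide
  | n + 4 => simp [pvPattern, List.getD]

-- B's `while pos > 0` loop; `pattern[i]` is in bounds since i is kept < 4 by `% 4`
def pvLoopB (xs : List Char) (pos i : Nat) (groups : List String) : List String :=
  if 0 < pos then
    let s := min (pvPattern.getD i 1) pos
    pvLoopB xs (pos - s) ((i + 1) % 4)
      (groups ++ [if PySem.Int.ofChars? (xs.extract (pos - s) pos) = some 0 then ""
                  else String.ofList (xs.extract (pos - s) pos)])
  else groups
termination_by pos
decreasing_by
  have := pvPattern_getD_pos i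
  omega

def slice_num_alt (x : String) : List String :=
  let cut := max (x.toList.length - 2) 0
  (pvLoopB x.toList cut 0 [String.ofList (x.toList.drop cut)]).reverse

-- ===== PRECONDITION & SPEC =====
-- Pre_ admits exactly the inputs on which A returns: every chunk of the front part (chunk
-- boundaries sit at offsets d from the right with d % 7 in {0,1,3,5}, plus the front's end)
-- must be accepted by Python's int(); elsewhere A raises ValueError (and B raises there too).
def Pre_slice_num (x : String) : Prop :=
  (let xs := x.toList
   let m := xs.length - 2
   let bs := (List.range (m + 1)).filter
     (fun d => 0 < d ∧ (d % 7 = 0 ∨ d % 7 = 1 ∨ d % 7 = 3 ∨ d % 7 = 5 ∨ d = m))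
   ((0 :: bs).zip bs).all
     (fun p => (PySem.Int.ofChars? (xs.extract (m - p.2) (m - p.1))).isSome)) = true
instance (x : String) : Decidable (Pre_slice_num x) := by unfold Pre_slice_num; infer_instance
def pvWitness_slice_num : String := "10101"

def Spec_slice_num (x : String) (out : List String) : Prop := out = slice_num_alt x
instance (x : String) (out : List String) : Decidable (Spec_slice_num x out) := by
  unfold Spec_slice_num; infer_instance

-- ===== CLAIM (what is proved, stated in full; the proofs are below) =====
def Claim_equal_slice_num : Prop :=
  ∀ (x : String), Dom_slice_num x → Pre_slice_num x → Spec_slice_num x (slice_num x)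

-- ===== LEMMAS AND PROOFS =====

-- the group both programs emit for the slice [a, b) of the original front string
def pvGrp (xs : List Char) (a b : Nat) : String :=
  if PySem.Int.ofChars? (xs.extract a b) = some 0 then "" else String.ofList (xs.extract a b)

lemma pvA_take1 (xs : List Char) (pos : Nat) (after : List String)
    (h1 : 1 ≤ pos) (h2 : pos ≤ xs.length) :
    pvStepA (xs.take pos, after) (-1) =
      (xs.take (pos - 1), after ++ [pvGrp xs (pos - 1) pos]) := by
  have hlen : (xs.take pos).length = pos := by simp; omega
  have hc : |(-1 : Int)| ≤ (((xs.take pos, after).1.length : Int)) := by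
    have : |(-1 : Int)| = 1 := by decide
    simp only [this, hlen]; exact_mod_cast h1
  have e1 : PySem.List.slice (xs.take pos) (some (-1)) none = xs.extract (pos - 1) pos := by
    rw [PySem.List.slice_from_neg_one, hlen, List.drop_take, List.extract_eq_take_drop]
  have e2 : PySem.List.slice (xs.take pos) none (some (-1)) = xs.take (pos - 1) := by
    rw [PySem.List.slice_to_neg_one, List.dropLast_eq_take, hlen, List.take_take]
    congr 1; omega
  unfold pvStepA
  rw [if_pos hc]
  simp only [e1, e2, pvGrp]
  split <;> rfl

lemma pvA_take2 (xs : List Char) (pos : Nat) (after : List String)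
    (h1 : 2 ≤ pos) (h2 : pos ≤ xs.length) :
    pvStepA (xs.take pos, after) (-2) =
      (xs.take (pos - 2), after ++ [pvGrp xs (pos - 2) pos]) := by
  have hlen : (xs.take pos).length = pos := by simp; omega
  have hc : |(-2 : Int)| ≤ (((xs.take pos, after).1.length : Int)) := by
    have : |(-2 : Int)| = 2 := by decide
    simp only [this, hlen]; exact_mod_cast h1
  have e1 : PySem.List.slice (xs.take pos) (some (-2)) none = xs.extract (pos - 2) pos := by
    rw [PySem.List.slice_from_neg_ofNat (xs.take pos) 2 (by omega), hlen, List.drop_take,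
        List.extract_eq_take_drop]
  have e2 : PySem.List.slice (xs.take pos) none (some (-2)) = xs.take (pos - 2) := by
    rw [PySem.List.slice_to_neg_ofNat (xs.take pos) 2 (by omega), hlen, List.take_take]
    congr 1; omega
  unfold pvStepA
  rw [if_pos hc]
  simp only [e1, e2, pvGrp]
  split <;> rfl

lemma pvA_skip2 (xs : List Char) (pos : Nat) (after : List String)
    (h1 : pos < 2) (h2 : pos ≤ xs.length) :
    pvStepA (xs.take pos, after) (-2) = (xs.take pos, after) := by
  have hlen : (xs.take pos).length = pos := by simp; omega
  have hc : ¬ |(-2 : Int)| ≤ (((xs.take pos, after).1.length : Int)) := by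
    have : |(-2 : Int)| = 2 := by decide
    simp only [this, hlen]; exact_mod_cast Nat.not_le.mpr h1
  unfold pvStepA
  rw [if_neg hc]

-- one step of B's loop, with the size written out
lemma pvB_step (xs : List Char) (pos i : Nat) (g : List String) (h : 0 < pos) :
    pvLoopB xs pos i g =
      pvLoopB xs (pos - min (pvPattern.getD i 1) pos) ((i + 1) % 4)
        (g ++ [pvGrp xs (pos - min (pvPattern.getD i 1) pos) pos]) := by
  rw [pvLoopB, if_pos h]
  rfl

lemma pvB_stop (xs : List Char) (i : Nat) (g : List String) :
    pvLoopB xs 0 i g = g := by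
  rw [pvLoopB]
  simp

lemma pvB_step1 (xs : List Char) (pos : Nat) (g : List String) (h : 1 ≤ pos) :
    pvLoopB xs pos 0 g = pvLoopB xs (pos - 1) 1 (g ++ [pvGrp xs (pos - 1) pos]) := by
  have e : min (pvPattern.getD 0 1) pos = 1 := by
    simp [pvPattern]; omega
  rw [pvB_step xs pos 0 g (by omega), e]

lemma pvB_step2 (xs : List Char) (pos i : Nat) (g : List String)
    (hi : i = 1 ∨ i = 2 ∨ i = 3) (h : 2 ≤ pos) :
    pvLoopB xs pos i g = pvLoopB xs (pos - 2) ((i + 1) % 4) (g ++ [pvGrp xs (pos - 2) pos]) := by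
  have e : min (pvPattern.getD i 1) pos = 2 := by
    rcases hi with rfl | rfl | rfl <;> (simp [pvPattern]; omega)
  rw [pvB_step xs pos i g (by omega), e]

lemma pvB_last (xs : List Char) (i : Nat) (g : List String)
    (hi : i = 1 ∨ i = 2 ∨ i = 3) :
    pvLoopB xs 1 i g = g ++ [pvGrp xs 0 1] := by
  have e : min (pvPattern.getD i 1) 1 = 1 := by
    rcases hi with rfl | rfl | rfl <;> simp [pvPattern]
  rw [pvB_step xs 1 i g (by omega), e, pvB_stop]

lemma pvMain (xs : List Char) : ∀ (pos : Nat), pos ≤ xs.length → ∀ (after : List String),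
    pvLoopA (xs.take pos) after = pvLoopB xs pos 0 after := by
  intro pos
  induction pos using Nat.strong_induction_on with
  | _ pos ih =>
  intro hle after
  by_cases h7 : 7 ≤ pos
  · have hlen : 0 < (xs.take pos).length := by simp; omega
    rw [pvLoopA, dif_pos hlen]
    simp only [List.foldl_cons, List.foldl_nil]
    rw [pvA_take1 xs pos after (by omega) hle,
        pvA_take2 xs (pos - 1) _ (by omega) (by omega),
        pvA_take2 xs (pos - 1 - 2) _ (by omega) (by omega),
        pvA_take2 xs (pos - 1 - 2 - 2) _ (by omega) (by omega)]
    rw [ih (pos - 1 - 2 - 2 - 2) (by omega) (by omega)]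
    rw [pvB_step1 xs pos after (by omega),
        pvB_step2 xs (pos - 1) 1 _ (by tauto) (by omega),
        pvB_step2 xs (pos - 1 - 2) 2 _ (by tauto) (by omega),
        pvB_step2 xs (pos - 1 - 2 - 2) 3 _ (by tauto) (by omega)]
  · interval_cases pos
    · rw [pvLoopA, dif_neg (by simp), pvB_stop]
    · have hlen : 0 < (xs.take 1).length := by simp; omega
      rw [pvLoopA, dif_pos hlen]
      simp only [List.foldl_cons, List.foldl_nil]
      rw [pvA_take1 xs 1 after (by omega) hle,
          pvA_skip2 xs (1 - 1) _ (by omega) (by omega),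
          pvA_skip2 xs (1 - 1) _ (by omega) (by omega),
          pvA_skip2 xs (1 - 1) _ (by omega) (by omega)]
      rw [show (1 : Nat) - 1 = 0 from rfl, pvLoopA, dif_neg (by simp)]
      rw [pvB_step1 xs 1 after (by omega), pvB_stop]
    · have hlen : 0 < (xs.take 2).length := by simp; omega
      rw [pvLoopA, dif_pos hlen]
      simp only [List.foldl_cons, List.foldl_nil]
      rw [pvA_take1 xs 2 after (by omega) hle,
          pvA_skip2 xs (2 - 1) _ (by omega) (by omega),
          pvA_skip2 xs (2 - 1) _ (by omega) (by omega),
          pvA_skip2 xs (2 - 1) _ (by omega) (by omega)]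
      rw [ih (2 - 1) (by omega) (by omega)]
      rw [pvB_step1 xs 2 after (by omega)]
      rw [show (2 : Nat) - 1 = 1 from rfl]
      rw [pvB_step1 xs 1 _ (by omega), pvB_last xs 1 _ (by tauto), pvB_stop]
    · have hlen : 0 < (xs.take 3).length := by simp; omega
      rw [pvLoopA, dif_pos hlen]
      simp only [List.foldl_cons, List.foldl_nil]
      rw [pvA_take1 xs 3 after (by omega) hle,
          pvA_take2 xs (3 - 1) _ (by omega) (by omega),
          pvA_skip2 xs (3 - 1 - 2) _ (by omega) (by omega),
          pvA_skip2 xs (3 - 1 - 2) _ (by omega) (by omega)]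
      rw [show (3 : Nat) - 1 - 2 = 0 from rfl, pvLoopA, dif_neg (by simp)]
      rw [pvB_step1 xs 3 after (by omega),
          pvB_step2 xs (3 - 1) 1 _ (by tauto) (by omega)]
      rw [show (3 : Nat) - 1 - 2 = 0 from rfl, pvB_stop]
    · have hlen : 0 < (xs.take 4).length := by simp; omega
      rw [pvLoopA, dif_pos hlen]
      simp only [List.foldl_cons, List.foldl_nil]
      rw [pvA_take1 xs 4 after (by omega) hle,
          pvA_take2 xs (4 - 1) _ (by omega) (by omega),
          pvA_skip2 xs (4 - 1 - 2) _ (by omega) (by omega),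
          pvA_skip2 xs (4 - 1 - 2) _ (by omega) (by omega)]
      rw [show (4 : Nat) - 1 - 2 = 1 from rfl]
      have hlen1 : 0 < (xs.take 1).length := by simp; omega
      rw [pvLoopA, dif_pos hlen1]
      simp only [List.foldl_cons, List.foldl_nil]
      rw [pvA_take1 xs 1 _ (by omega) (by omega),
          pvA_skip2 xs (1 - 1) _ (by omega) (by omega),
          pvA_skip2 xs (1 - 1) _ (by omega) (by omega),
          pvA_skip2 xs (1 - 1) _ (by omega) (by omega)]
      rw [show (1 : Nat) - 1 = 0 from rfl, pvLoopA, dif_neg (by simp)]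
      rw [pvB_step1 xs 4 after (by omega),
          pvB_step2 xs (4 - 1) 1 _ (by tauto) (by omega)]
      rw [show (4 : Nat) - 1 - 2 = 1 from rfl, pvB_last xs 2 _ (by tauto)]
    · have hlen : 0 < (xs.take 5).length := by simp; omega
      rw [pvLoopA, dif_pos hlen]
      simp only [List.foldl_cons, List.foldl_nil]
      rw [pvA_take1 xs 5 after (by omega) hle,
          pvA_take2 xs (5 - 1) _ (by omega) (by omega),
          pvA_take2 xs (5 - 1 - 2) _ (by omega) (by omega),
          pvA_skip2 xs (5 - 1 - 2 - 2) _ (by omega) (by omega)]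
      rw [show (5 : Nat) - 1 - 2 - 2 = 0 from rfl, pvLoopA, dif_neg (by simp)]
      rw [pvB_step1 xs 5 after (by omega),
          pvB_step2 xs (5 - 1) 1 _ (by tauto) (by omega),
          pvB_step2 xs (5 - 1 - 2) 2 _ (by tauto) (by omega)]
      rw [show (5 : Nat) - 1 - 2 - 2 = 0 from rfl, pvB_stop]
    · have hlen : 0 < (xs.take 6).length := by simp; omega
      rw [pvLoopA, dif_pos hlen]
      simp only [List.foldl_cons, List.foldl_nil]
      rw [pvA_take1 xs 6 after (by omega) hle,
          pvA_take2 xs (6 - 1) _ (by omega) (by omega),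
          pvA_take2 xs (6 - 1 - 2) _ (by omega) (by omega),
          pvA_skip2 xs (6 - 1 - 2 - 2) _ (by omega) (by omega)]
      rw [show (6 : Nat) - 1 - 2 - 2 = 1 from rfl]
      have hlen1 : 0 < (xs.take 1).length := by simp; omega
      rw [pvLoopA, dif_pos hlen1]
      simp only [List.foldl_cons, List.foldl_nil]
      rw [pvA_take1 xs 1 _ (by omega) (by omega),
          pvA_skip2 xs (1 - 1) _ (by omega) (by omega),
          pvA_skip2 xs (1 - 1) _ (by omega) (by omega),
          pvA_skip2 xs (1 - 1) _ (by omega) (by omega)]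
      rw [show (1 : Nat) - 1 = 0 from rfl, pvLoopA, dif_neg (by simp)]
      rw [pvB_step1 xs 6 after (by omega),
          pvB_step2 xs (6 - 1) 1 _ (by tauto) (by omega),
          pvB_step2 xs (6 - 1 - 2) 2 _ (by tauto) (by omega)]
      rw [show (6 : Nat) - 1 - 2 - 2 = 1 from rfl, pvB_last xs 3 _ (by tauto)]

-- ===== VERDICT (by name: the statement is the Claim_ definition above) =====
theorem slice_num_spec : Claim_equal_slice_num := by
  unfold Claim_equal_slice_num
  intro x _ _
  unfold Spec_slice_num slice_num slice_num_alt
  have e1 : PySem.List.slice x.toList none (some (-2)) = x.toList.take (x.toList.length - 2) :=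
    PySem.List.slice_to_neg_ofNat x.toList 2 (by omega)
  have e2 : PySem.List.slice x.toList (some (-2)) none = x.toList.drop (x.toList.length - 2) :=
    PySem.List.slice_from_neg_ofNat x.toList 2 (by omega)
  have e3 : max (x.toList.length - 2) 0 = x.toList.length - 2 := by omega
  simp only [e1, e2, e3]
  rw [pvMain x.toList (x.toList.length - 2) (by omega)]
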